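-- pv_equiv track=rewrite | github.com/Meghana-12/mysterion-1 | mysterion.py | shiftcolumns2_inv
-- ===== SOURCE A (Python) =====
-- def ror(x, n):
--     """
--     >>> ror(0b00110000000000000000000000000001, 2) == 0b01001100000000000000000000000000
--     True
--     """
--     hi = x & ((0xffffffff >> n) << n)
--     lo = x & (0xffffffff >> (32 - n))
--     hi >>= n
--     lo <<= 32 - n
--     return hi | lo
--
-- def shiftcolumns2_inv(state):
--     out = [None] * 4
--     for i in range(4):
--         out[i]  =     state[i] & 0xc0c0c0c0
--         out[i] |= ror(state[i] & 0x30303030, 24)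
--         out[i] |= ror(state[i] & 0x0c0c0c0c, 16)
--         out[i] |= ror(state[i] & 0x03030303, 8)
--     return out
-- ===== SOURCE B (Python) =====
-- # Table-driven reimplementation: per byte-position lookup tables replace the
-- # per-bit-column mask+rotate passes.
-- _T = [
--     [
--         ((v & 0xc0) << (8 * p))
--         | ((v & 0x30) << (8 * ((p + 1) % 4)))
--         | ((v & 0x0c) << (8 * ((p + 2) % 4)))
--         | ((v & 0x03) << (8 * ((p + 3) % 4)))
--         for v in range(256)
--     ]
--     for p in range(4)
-- ]
--
-- def shiftcolumns2_inv(state):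
--     out = []
--     for i in range(4):
--         w = state[i]
--         acc = 0
--         for p in range(4):
--             acc |= _T[p][(w >> (8 * p)) & 0xff]
--         out.append(acc)
--     return out
-- ===== Notes on version B (the rewrite author's own statement) =====
-- stated objective: alternative
-- what changed: B replaces A's three mask+rotate passes per word by four precomputed 256-entry lookup tables (one per byte position) whose contributions are OR-ed together from the word's four bytes.
import Mathlib
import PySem

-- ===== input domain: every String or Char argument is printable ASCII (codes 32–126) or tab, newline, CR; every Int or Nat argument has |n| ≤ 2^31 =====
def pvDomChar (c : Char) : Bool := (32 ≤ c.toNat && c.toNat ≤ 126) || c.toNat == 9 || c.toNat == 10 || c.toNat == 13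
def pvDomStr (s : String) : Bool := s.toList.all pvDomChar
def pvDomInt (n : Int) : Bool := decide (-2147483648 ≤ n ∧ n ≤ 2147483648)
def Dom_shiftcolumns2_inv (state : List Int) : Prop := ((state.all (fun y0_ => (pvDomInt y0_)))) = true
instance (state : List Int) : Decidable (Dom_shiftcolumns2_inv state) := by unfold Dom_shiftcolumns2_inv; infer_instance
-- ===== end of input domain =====

-- B replaces A's per-bit-column mask+rotate passes by four precomputed
-- 256-entry byte tables OR-ed together per word (objective: alternative).

-- ===== PORT A =====
-- ror helper: n is a nonnegative literal (24/16/8) at every call site, so it is a Nat here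
def pvRor (x : Int) (n : Nat) : Int :=
  let hi := PySem.Int.band x (((0xffffffff : Int) >>> n) <<< n)
  let lo := PySem.Int.band x ((0xffffffff : Int) >>> (32 - n))
  let hi2 := hi >>> n
  let lo2 := lo <<< (32 - n)
  PySem.Int.bor hi2 lo2

-- out = [None]*4 is modelled as a list of dummy 0s: every slot is overwritten before it is read
def shiftcolumns2_inv (state : List Int) : List Int :=
  (PySem.List.pyRange 0 4 1).foldl (fun out i =>
    let si := PySem.List.pyGetD state i 0
    let v0 := PySem.Int.band si 0xc0c0c0c0
    let v1 := PySem.Int.bor v0 (pvRor (PySem.Int.band si 0x30303030) 24)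
    let v2 := PySem.Int.bor v1 (pvRor (PySem.Int.band si 0x0c0c0c0c) 16)
    let v3 := PySem.Int.bor v2 (pvRor (PySem.Int.band si 0x03030303) 8)
    PySem.List.pySetD out i v3) (List.replicate 4 (0 : Int))

-- ===== PORT B =====
def pvTblEntry (p v : Int) : Int :=
  PySem.Int.bor (PySem.Int.bor (PySem.Int.bor
    ((PySem.Int.band v 0xc0) <<< (8 * p).toNat)
    ((PySem.Int.band v 0x30) <<< (8 * (PySem.Int.mod (p + 1) 4)).toNat))
    ((PySem.Int.band v 0x0c) <<< (8 * (PySem.Int.mod (p + 2) 4)).toNat))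
    ((PySem.Int.band v 0x03) <<< (8 * (PySem.Int.mod (p + 3) 4)).toNat)

def pvTbl : List (List Int) :=
  (PySem.List.pyRange 0 4 1).map (fun p =>
    (PySem.List.pyRange 0 256 1).map (fun v => pvTblEntry p v))

def shiftcolumns2_inv_alt (state : List Int) : List Int :=
  (PySem.List.pyRange 0 4 1).foldl (fun out i =>
    let w := PySem.List.pyGetD state i 0
    let acc := (PySem.List.pyRange 0 4 1).foldl (fun acc p =>
      PySem.Int.bor acc (PySem.List.pyGetD (PySem.List.pyGetD pvTbl p [])
        (PySem.Int.band (w >>> (8 * p).toNat) 0xff) 0)) 0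
    out ++ [acc]) []

-- ===== PRECONDITION & SPEC =====
-- Pre_: A raises IndexError (state[i] for i < 4) iff the list has fewer than 4 elements
def Pre_shiftcolumns2_inv (state : List Int) : Prop := 4 ≤ state.length
instance (state : List Int) : Decidable (Pre_shiftcolumns2_inv state) := by
  unfold Pre_shiftcolumns2_inv; infer_instance
def pvWitness_shiftcolumns2_inv : List Int := [0, 1, 2, 3]

def Spec_shiftcolumns2_inv (state : List Int) (out : List Int) : Prop := out = shiftcolumns2_inv_alt state
instance (state : List Int) (out : List Int) : Decidable (Spec_shiftcolumns2_inv state out) := by unfold Spec_shiftcolumns2_inv; infer_instance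

-- ===== CLAIM (what is proved, stated in full; the proofs are below) =====
def Claim_equal_shiftcolumns2_inv : Prop := ∀ (state : List Int), Dom_shiftcolumns2_inv state → Pre_shiftcolumns2_inv state → Spec_shiftcolumns2_inv state (shiftcolumns2_inv state)

-- ===== LEMMAS AND PROOFS =====

-- per-word value computed by A
def pvWA (w : Int) : Int :=
  PySem.Int.bor (PySem.Int.bor (PySem.Int.bor (PySem.Int.band w 0xc0c0c0c0)
    (pvRor (PySem.Int.band w 0x30303030) 24))
    (pvRor (PySem.Int.band w 0x0c0c0c0c) 16))
    (pvRor (PySem.Int.band w 0x03030303) 8)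

-- per-word value computed by B
def pvWB (w : Int) : Int :=
  PySem.Int.bor (PySem.Int.bor (PySem.Int.bor (PySem.Int.bor 0
    (PySem.List.pyGetD (PySem.List.pyGetD pvTbl 0 []) (PySem.Int.band (w >>> (8 * (0:Int)).toNat) 0xff) 0))
    (PySem.List.pyGetD (PySem.List.pyGetD pvTbl 1 []) (PySem.Int.band (w >>> (8 * (1:Int)).toNat) 0xff) 0))
    (PySem.List.pyGetD (PySem.List.pyGetD pvTbl 2 []) (PySem.Int.band (w >>> (8 * (2:Int)).toNat) 0xff) 0))
    (PySem.List.pyGetD (PySem.List.pyGetD pvTbl 3 []) (PySem.Int.band (w >>> (8 * (3:Int)).toNat) 0xff) 0)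

theorem pvA_eval (a b c d : Int) (rest : List Int) :
    shiftcolumns2_inv (a :: b :: c :: d :: rest) = [pvWA a, pvWA b, pvWA c, pvWA d] := by
  have hr : PySem.List.pyRange 0 4 1 = [0,1,2,3] := by decide
  unfold shiftcolumns2_inv
  rw [hr]
  simp only [List.foldl]
  have h1 : (0:Int) ≤ (rest.length:Int) + 1 + 1 + 1 := by positivity
  have h2 : (0:Int) ≤ (rest.length:Int) + 1 + 1 := by positivity
  have h3 : (0:Int) ≤ (rest.length:Int) + 1 := by positivity
  have h4 : (0:Int) ≤ (rest.length:Int) := by positivity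
  have h5 : (2:Int) ≤ (rest.length:Int) + 1 + 1 + 1 := by omega
  have h6 : (3:Int) ≤ (rest.length:Int) + 1 + 1 + 1 := by omega
  have h7 : (1:Int) ≤ (rest.length:Int) + 1 + 1 + 1 := by omega
  norm_num [h1, h2, h3, h4, h5, h6, h7, show Int.toNat 2 = 2 from rfl,
    show Int.toNat 3 = 3 from rfl, show Int.toNat 1 = 1 from rfl, show Int.toNat 0 = 0 from rfl,
    PySem.List.pyGetD, PySem.List.pyGet?, PySem.List.pyIdx?, PySem.List.pySetD,
    PySem.List.pySet?, PySem.Raise.InRange, pvWA, List.replicate]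

theorem pvB_eval (a b c d : Int) (rest : List Int) :
    shiftcolumns2_inv_alt (a :: b :: c :: d :: rest) = [pvWB a, pvWB b, pvWB c, pvWB d] := by
  have hr : PySem.List.pyRange 0 4 1 = [0,1,2,3] := by decide
  have g0 : PySem.List.pyGetD (a::b::c::d::rest) (0:Int) 0 = a := by
    rw [PySem.List.pyGetD_eq_getElem _ _ (by norm_num) (by simp; omega)]; rfl
  have g1 : PySem.List.pyGetD (a::b::c::d::rest) (1:Int) 0 = b := by
    rw [PySem.List.pyGetD_eq_getElem _ _ (by norm_num) (by simp; omega)]; rfl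
  have g2 : PySem.List.pyGetD (a::b::c::d::rest) (2:Int) 0 = c := by
    rw [PySem.List.pyGetD_eq_getElem _ _ (by norm_num) (by simp; omega)]; rfl
  have g3 : PySem.List.pyGetD (a::b::c::d::rest) (3:Int) 0 = d := by
    rw [PySem.List.pyGetD_eq_getElem _ _ (by norm_num) (by simp; omega)]; rfl
  unfold shiftcolumns2_inv_alt
  rw [hr]
  simp only [List.foldl, g0, g1, g2, g3]
  rfl

theorem pv_sub_and (m k : Nat) : m - (m &&& k) = m ^^^ (m &&& k) := by
  induction m using Nat.binaryRec generalizing k with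
  | zero => simp
  | bit b n ih =>
    rw [← Nat.bit_testBit_zero_shiftRight_one k, Nat.land_bit, Nat.xor_bit]
    have h1 : n &&& (k >>> 1) ≤ n := Nat.and_le_left
    have h2 := ih (k >>> 1)
    cases b <;> cases k.testBit 0 <;> simp [Nat.bit_val] <;> omega

theorem pvByte_bounds (x : Int) : 0 ≤ PySem.Int.band x 255 ∧ PySem.Int.band x 255 < 256 := by
  unfold PySem.Int.band
  split_ifs with h1 h2 h2
  · have h : x.toNat &&& Int.toNat 255 ≤ Int.toNat 255 := Nat.and_le_right
    constructor
    · positivity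
    · omega
  · norm_num at h2
  · have h := Nat.sub_le (Int.toNat 255) (Int.toNat 255 &&& (-x - 1).toNat)
    constructor
    · positivity
    · omega
  · norm_num at h2

theorem pv_band_negSucc (m : Nat) (C : Int) (hC : 0 ≤ C) :
    PySem.Int.band (Int.negSucc m) C = ((C.toNat ^^^ (C.toNat &&& m) : Nat) : Int) := by
  unfold PySem.Int.band
  have hneg : ¬ (0 ≤ Int.negSucc m) := by
    have := Int.negSucc_lt_zero m; omega
  rw [if_neg hneg, if_pos hC]
  have h2 : (-Int.negSucc m - 1) = (m : Int) := by rw [Int.negSucc_eq]; ring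
  rw [h2, Int.toNat_natCast, pv_sub_and]

theorem pvWB_eq (w : Int) : pvWB w =
    PySem.Int.bor (PySem.Int.bor (PySem.Int.bor (PySem.Int.bor 0
      (pvTblEntry 0 (PySem.Int.band (w >>> (0:Nat)) 255)))
      (pvTblEntry 1 (PySem.Int.band (w >>> (8:Nat)) 255)))
      (pvTblEntry 2 (PySem.Int.band (w >>> (16:Nat)) 255)))
      (pvTblEntry 3 (PySem.Int.band (w >>> (24:Nat)) 255)) := by
  unfold pvWB pvTbl
  rw [show ((8 * (0:Int)).toNat) = (0:Nat) from rfl, show ((8 * (1:Int)).toNat) = (8:Nat) from rfl,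
      show ((8 * (2:Int)).toNat) = (16:Nat) from rfl, show ((8 * (3:Int)).toNat) = (24:Nat) from rfl]
  rw [PySem.List.pyGetD_map_pyRange_of_nonneg _ 4 0 [] (by norm_num) (by norm_num),
      PySem.List.pyGetD_map_pyRange_of_nonneg _ 4 1 [] (by norm_num) (by norm_num),
      PySem.List.pyGetD_map_pyRange_of_nonneg _ 4 2 [] (by norm_num) (by norm_num),
      PySem.List.pyGetD_map_pyRange_of_nonneg _ 4 3 [] (by norm_num) (by norm_num)]
  rw [PySem.List.pyGetD_map_pyRange_of_nonneg _ 256 _ 0 (pvByte_bounds _).1 (by exact_mod_cast (pvByte_bounds (w >>> (0:Nat))).2),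
      PySem.List.pyGetD_map_pyRange_of_nonneg _ 256 _ 0 (pvByte_bounds _).1 (by exact_mod_cast (pvByte_bounds (w >>> (8:Nat))).2),
      PySem.List.pyGetD_map_pyRange_of_nonneg _ 256 _ 0 (pvByte_bounds _).1 (by exact_mod_cast (pvByte_bounds (w >>> (16:Nat))).2),
      PySem.List.pyGetD_map_pyRange_of_nonneg _ 256 _ 0 (pvByte_bounds _).1 (by exact_mod_cast (pvByte_bounds (w >>> (24:Nat))).2)]

def pvANat (n : Nat) : Nat :=
  n &&& 3233857728 ||| ((n &&& 808464432 &&& 4278190080) >>> 24 ||| (n &&& 808464432 &&& 16777215) <<< 8) |||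
    ((n &&& 202116108 &&& 4294901760) >>> 16 ||| (n &&& 202116108 &&& 65535) <<< 16) |||
    ((n &&& 50529027 &&& 4294967040) >>> 8 ||| (n &&& 50529027 &&& 255) <<< 24)

def pvBNat (n : Nat) : Nat :=
  0 ||| ((n >>> 0 &&& 255 &&& 192) <<< 0 ||| (n >>> 0 &&& 255 &&& 48) <<< 8 ||| (n >>> 0 &&& 255 &&& 12) <<< 16 ||| (n >>> 0 &&& 255 &&& 3) <<< 24) |||
  ((n >>> 8 &&& 255 &&& 192) <<< 8 ||| (n >>> 8 &&& 255 &&& 48) <<< 16 ||| (n >>> 8 &&& 255 &&& 12) <<< 24 ||| (n >>> 8 &&& 255 &&& 3) <<< 0) |||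
  ((n >>> 16 &&& 255 &&& 192) <<< 16 ||| (n >>> 16 &&& 255 &&& 48) <<< 24 ||| (n >>> 16 &&& 255 &&& 12) <<< 0 ||| (n >>> 16 &&& 255 &&& 3) <<< 8) |||
  ((n >>> 24 &&& 255 &&& 192) <<< 24 ||| (n >>> 24 &&& 255 &&& 48) <<< 0 ||| (n >>> 24 &&& 255 &&& 12) <<< 8 ||| (n >>> 24 &&& 255 &&& 3) <<< 16)

set_option maxHeartbeats 1000000 in
theorem pvWA_natCast (n : Nat) : pvWA ((n : Int)) = ((pvANat n : Nat) : Int) := by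
  have e4 : ((4294967295:Int) >>> (8:Nat)) = 16777215 := by decide
  have e5 : ((4294967295:Int) >>> (16:Nat)) = 65535 := by decide
  have e6 : ((4294967295:Int) >>> (24:Nat)) = 255 := by decide
  have e7 : ((255:Int) <<< (24:Nat)) = 4278190080 := by decide
  have e8 : ((65535:Int) <<< (16:Nat)) = 4294901760 := by decide
  have e9 : ((16777215:Int) <<< (8:Nat)) = 4294967040 := by decide
  have hc1 : (0:Int) ≤ 3233857728 := by decide
  have hc2 : (0:Int) ≤ 808464432 := by decide
  have hc3 : (0:Int) ≤ 202116108 := by decide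
  have hc4 : (0:Int) ≤ 50529027 := by decide
  have hc5 : (0:Int) ≤ 4278190080 := by decide
  have hc6 : (0:Int) ≤ 4294901760 := by decide
  have hc7 : (0:Int) ≤ 4294967040 := by decide
  have hc8 : (0:Int) ≤ 16777215 := by decide
  have hc9 : (0:Int) ≤ 65535 := by decide
  have hc10 : (0:Int) ≤ 255 := by decide
  simp only [pvWA, pvRor,
    show (32-24 : Nat) = 8 from rfl, show (32-16 : Nat) = 16 from rfl, show (32-8 : Nat) = 24 from rfl,
    e4, e5, e6, e7, e8, e9]
  simp only [hc1, hc2, hc3, hc4, hc5, hc6, hc7, hc8, hc9, hc10, Int.natCast_nonneg,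
    Int.toNat_natCast, show Int.toNat 3233857728 = 3233857728 from rfl,
    show Int.toNat 808464432 = 808464432 from rfl,
    show Int.toNat 202116108 = 202116108 from rfl,
    show Int.toNat 50529027 = 50529027 from rfl,
    show Int.toNat 4278190080 = 4278190080 from rfl,
    show Int.toNat 4294901760 = 4294901760 from rfl,
    show Int.toNat 4294967040 = 4294967040 from rfl,
    show Int.toNat 16777215 = 16777215 from rfl,
    show Int.toNat 65535 = 65535 from rfl,
    show Int.toNat 255 = 255 from rfl,
    PySem.Int.band_of_nonneg, PySem.Int.bor_of_nonneg, ← Int.natCast_shiftRight,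
    ← Int.natCast_shiftLeft]
  rfl

set_option maxHeartbeats 1000000 in
theorem pvWB_natCast (n : Nat) : pvWB ((n : Int)) = ((pvBNat n : Nat) : Int) := by
  have m1 : PySem.Int.mod (0+1:Int) 4 = 1 := by decide
  have m2 : PySem.Int.mod (0+2:Int) 4 = 2 := by decide
  have m3 : PySem.Int.mod (0+3:Int) 4 = 3 := by decide
  have m4 : PySem.Int.mod (1+1:Int) 4 = 2 := by decide
  have m5 : PySem.Int.mod (1+2:Int) 4 = 3 := by decide
  have m6 : PySem.Int.mod (1+3:Int) 4 = 0 := by decide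
  have m7 : PySem.Int.mod (2+1:Int) 4 = 3 := by decide
  have m8 : PySem.Int.mod (2+2:Int) 4 = 0 := by decide
  have m9 : PySem.Int.mod (2+3:Int) 4 = 1 := by decide
  have m10 : PySem.Int.mod (3+1:Int) 4 = 0 := by decide
  have m11 : PySem.Int.mod (3+2:Int) 4 = 1 := by decide
  have m12 : PySem.Int.mod (3+3:Int) 4 = 2 := by decide
  have hc0 : (0:Int) ≤ 0 := by decide
  have hc1 : (0:Int) ≤ 255 := by decide
  have hc2 : (0:Int) ≤ 192 := by decide
  have hc3 : (0:Int) ≤ 48 := by decide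
  have hc4 : (0:Int) ≤ 12 := by decide
  have hc5 : (0:Int) ≤ 3 := by decide
  rw [pvWB_eq]
  simp only [pvTblEntry, m1, m2, m3, m4, m5, m6, m7, m8, m9, m10, m11, m12]
  simp only [show ((8:Int) * 0).toNat = 0 from rfl, show ((8:Int) * 1).toNat = 8 from rfl,
    show ((8:Int) * 2).toNat = 16 from rfl, show ((8:Int) * 3).toNat = 24 from rfl,
    ← Int.natCast_shiftRight,
    hc0, hc1, hc2, hc3, hc4, hc5, Int.natCast_nonneg,
    PySem.Int.band_of_nonneg, Int.toNat_natCast,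
    show Int.toNat 255 = 255 from rfl, show Int.toNat 192 = 192 from rfl,
    show Int.toNat 48 = 48 from rfl, show Int.toNat 12 = 12 from rfl,
    show Int.toNat 3 = 3 from rfl, show Int.toNat 0 = 0 from rfl,
    ← Int.natCast_shiftLeft,
    PySem.Int.bor_of_nonneg]
  rfl

def pvANeg (m : Nat) : Nat :=
  3233857728 ^^^ 3233857728 &&& m |||
    (((808464432 ^^^ 808464432 &&& m) &&& 4278190080) >>> 24 |||
      ((808464432 ^^^ 808464432 &&& m) &&& 16777215) <<< 8) |||
    (((202116108 ^^^ 202116108 &&& m) &&& 4294901760) >>> 16 |||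
      ((202116108 ^^^ 202116108 &&& m) &&& 65535) <<< 16) |||
    (((50529027 ^^^ 50529027 &&& m) &&& 4294967040) >>> 8 |||
      ((50529027 ^^^ 50529027 &&& m) &&& 255) <<< 24)

def pvBNeg (m : Nat) : Nat :=
  0 |||
      (((255 ^^^ 255 &&& m >>> 0) &&& 192) <<< 0 ||| ((255 ^^^ 255 &&& m >>> 0) &&& 48) <<< 8 |||
          ((255 ^^^ 255 &&& m >>> 0) &&& 12) <<< 16 |||
        ((255 ^^^ 255 &&& m >>> 0) &&& 3) <<< 24) |||
    (((255 ^^^ 255 &&& m >>> 8) &&& 192) <<< 8 ||| ((255 ^^^ 255 &&& m >>> 8) &&& 48) <<< 16 |||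
        ((255 ^^^ 255 &&& m >>> 8) &&& 12) <<< 24 |||
      ((255 ^^^ 255 &&& m >>> 8) &&& 3) <<< 0) |||
    (((255 ^^^ 255 &&& m >>> 16) &&& 192) <<< 16 ||| ((255 ^^^ 255 &&& m >>> 16) &&& 48) <<< 24 |||
        ((255 ^^^ 255 &&& m >>> 16) &&& 12) <<< 0 |||
      ((255 ^^^ 255 &&& m >>> 16) &&& 3) <<< 8) |||
    (((255 ^^^ 255 &&& m >>> 24) &&& 192) <<< 24 ||| ((255 ^^^ 255 &&& m >>> 24) &&& 48) <<< 0 |||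
        ((255 ^^^ 255 &&& m >>> 24) &&& 12) <<< 8 |||
      ((255 ^^^ 255 &&& m >>> 24) &&& 3) <<< 16)

set_option maxHeartbeats 1000000 in
theorem pvWA_negSucc (m : Nat) : pvWA (Int.negSucc m) = ((pvANeg m : Nat) : Int) := by
  have e4 : ((4294967295:Int) >>> (8:Nat)) = 16777215 := by decide
  have e5 : ((4294967295:Int) >>> (16:Nat)) = 65535 := by decide
  have e6 : ((4294967295:Int) >>> (24:Nat)) = 255 := by decide
  have e7 : ((255:Int) <<< (24:Nat)) = 4278190080 := by decide
  have e8 : ((65535:Int) <<< (16:Nat)) = 4294901760 := by decide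
  have e9 : ((16777215:Int) <<< (8:Nat)) = 4294967040 := by decide
  have hc1 : (0:Int) ≤ 3233857728 := by decide
  have hc2 : (0:Int) ≤ 808464432 := by decide
  have hc3 : (0:Int) ≤ 202116108 := by decide
  have hc4 : (0:Int) ≤ 50529027 := by decide
  have hc5 : (0:Int) ≤ 4278190080 := by decide
  have hc6 : (0:Int) ≤ 4294901760 := by decide
  have hc7 : (0:Int) ≤ 4294967040 := by decide
  have hc8 : (0:Int) ≤ 16777215 := by decide
  have hc9 : (0:Int) ≤ 65535 := by decide
  have hc10 : (0:Int) ≤ 255 := by decide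
  simp only [pvWA, pvRor,
    show (32-24 : Nat) = 8 from rfl, show (32-16 : Nat) = 16 from rfl, show (32-8 : Nat) = 24 from rfl,
    e4, e5, e6, e7, e8, e9]
  simp only [pv_band_negSucc _ _ hc1, pv_band_negSucc _ _ hc2, pv_band_negSucc _ _ hc3,
    pv_band_negSucc _ _ hc4]
  simp only [hc5, hc6, hc7, hc8, hc9, hc10, Int.natCast_nonneg,
    Int.toNat_natCast,
    show Int.toNat 3233857728 = 3233857728 from rfl,
    show Int.toNat 808464432 = 808464432 from rfl,
    show Int.toNat 202116108 = 202116108 from rfl,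
    show Int.toNat 50529027 = 50529027 from rfl,
    show Int.toNat 4278190080 = 4278190080 from rfl,
    show Int.toNat 4294901760 = 4294901760 from rfl,
    show Int.toNat 4294967040 = 4294967040 from rfl,
    show Int.toNat 16777215 = 16777215 from rfl,
    show Int.toNat 65535 = 65535 from rfl,
    show Int.toNat 255 = 255 from rfl,
    PySem.Int.band_of_nonneg, PySem.Int.bor_of_nonneg, ← Int.natCast_shiftRight,
    ← Int.natCast_shiftLeft]
  rfl

set_option maxHeartbeats 1000000 in
theorem pvWB_negSucc (m : Nat) : pvWB (Int.negSucc m) = ((pvBNeg m : Nat) : Int) := by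
  have m1 : PySem.Int.mod (0+1:Int) 4 = 1 := by decide
  have m2 : PySem.Int.mod (0+2:Int) 4 = 2 := by decide
  have m3 : PySem.Int.mod (0+3:Int) 4 = 3 := by decide
  have m4 : PySem.Int.mod (1+1:Int) 4 = 2 := by decide
  have m5 : PySem.Int.mod (1+2:Int) 4 = 3 := by decide
  have m6 : PySem.Int.mod (1+3:Int) 4 = 0 := by decide
  have m7 : PySem.Int.mod (2+1:Int) 4 = 3 := by decide
  have m8 : PySem.Int.mod (2+2:Int) 4 = 0 := by decide
  have m9 : PySem.Int.mod (2+3:Int) 4 = 1 := by decide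
  have m10 : PySem.Int.mod (3+1:Int) 4 = 0 := by decide
  have m11 : PySem.Int.mod (3+2:Int) 4 = 1 := by decide
  have m12 : PySem.Int.mod (3+3:Int) 4 = 2 := by decide
  have hc0 : (0:Int) ≤ 0 := by decide
  have hc1 : (0:Int) ≤ 255 := by decide
  have hc2 : (0:Int) ≤ 192 := by decide
  have hc3 : (0:Int) ≤ 48 := by decide
  have hc4 : (0:Int) ≤ 12 := by decide
  have hc5 : (0:Int) ≤ 3 := by decide
  rw [pvWB_eq]
  simp only [Int.negSucc_shiftRight]
  simp only [pv_band_negSucc _ _ hc1]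
  simp only [pvTblEntry, m1, m2, m3, m4, m5, m6, m7, m8, m9, m10, m11, m12]
  simp only [show ((8:Int) * 0).toNat = 0 from rfl, show ((8:Int) * 1).toNat = 8 from rfl,
    show ((8:Int) * 2).toNat = 16 from rfl, show ((8:Int) * 3).toNat = 24 from rfl,
    hc0, hc2, hc3, hc4, hc5, Int.natCast_nonneg,
    PySem.Int.band_of_nonneg, Int.toNat_natCast,
    show Int.toNat 255 = 255 from rfl, show Int.toNat 192 = 192 from rfl,
    show Int.toNat 48 = 48 from rfl, show Int.toNat 12 = 12 from rfl,
    show Int.toNat 3 = 3 from rfl, show Int.toNat 0 = 0 from rfl,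
    ← Int.natCast_shiftLeft,
    PySem.Int.bor_of_nonneg]
  rfl

theorem pv_or_lt {x y : Nat} (hx : x < 2^32) (hy : y < 2^32) : x ||| y < 2^32 :=
  Nat.or_lt_two_pow hx hy
theorem pv_and_lt (x C : Nat) (h : C < 2^32) : x &&& C < 2^32 :=
  lt_of_le_of_lt Nat.and_le_right h
theorem pv_shl_lt (x C s : Nat) (h : C * 2^s < 2^32) : (x &&& C) <<< s < 2^32 := by
  rw [Nat.shiftLeft_eq]; exact lt_of_le_of_lt (Nat.mul_le_mul_right _ Nat.and_le_right) h
theorem pv_shr_lt (x C s : Nat) (h : C < 2^32) : (x &&& C) >>> s < 2^32 :=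
  lt_of_le_of_lt (le_trans (Nat.shiftRight_le _ _) Nat.and_le_right) h
theorem pv_xor_lt (C x : Nat) (h : C < 2^32) : C ^^^ C &&& x < 2^32 :=
  Nat.xor_lt_two_pow h (lt_of_le_of_lt Nat.and_le_left h)
theorem pv_zero_lt : (0:Nat) < 2^32 := by norm_num

theorem pvANat_lt (n : Nat) : pvANat n < 2^32 := by
  unfold pvANat
  exact pv_or_lt (pv_or_lt (pv_or_lt (pv_and_lt _ _ (by norm_num))
    (pv_or_lt (pv_shr_lt _ _ _ (by norm_num)) (pv_shl_lt _ _ _ (by norm_num))))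
    (pv_or_lt (pv_shr_lt _ _ _ (by norm_num)) (pv_shl_lt _ _ _ (by norm_num))))
    (pv_or_lt (pv_shr_lt _ _ _ (by norm_num)) (pv_shl_lt _ _ _ (by norm_num)))

theorem pvBNat_lt (n : Nat) : pvBNat n < 2^32 := by
  unfold pvBNat
  exact pv_or_lt (pv_or_lt (pv_or_lt (pv_or_lt pv_zero_lt
    (pv_or_lt (pv_or_lt (pv_or_lt (pv_shl_lt _ _ _ (by norm_num)) (pv_shl_lt _ _ _ (by norm_num))) (pv_shl_lt _ _ _ (by norm_num))) (pv_shl_lt _ _ _ (by norm_num))))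
    (pv_or_lt (pv_or_lt (pv_or_lt (pv_shl_lt _ _ _ (by norm_num)) (pv_shl_lt _ _ _ (by norm_num))) (pv_shl_lt _ _ _ (by norm_num))) (pv_shl_lt _ _ _ (by norm_num))))
    (pv_or_lt (pv_or_lt (pv_or_lt (pv_shl_lt _ _ _ (by norm_num)) (pv_shl_lt _ _ _ (by norm_num))) (pv_shl_lt _ _ _ (by norm_num))) (pv_shl_lt _ _ _ (by norm_num))))
    (pv_or_lt (pv_or_lt (pv_or_lt (pv_shl_lt _ _ _ (by norm_num)) (pv_shl_lt _ _ _ (by norm_num))) (pv_shl_lt _ _ _ (by norm_num))) (pv_shl_lt _ _ _ (by norm_num)))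

theorem pvANeg_lt (m : Nat) : pvANeg m < 2^32 := by
  unfold pvANeg
  exact pv_or_lt (pv_or_lt (pv_or_lt (pv_xor_lt _ _ (by norm_num))
    (pv_or_lt (pv_shr_lt _ _ _ (by norm_num)) (pv_shl_lt _ _ _ (by norm_num))))
    (pv_or_lt (pv_shr_lt _ _ _ (by norm_num)) (pv_shl_lt _ _ _ (by norm_num))))
    (pv_or_lt (pv_shr_lt _ _ _ (by norm_num)) (pv_shl_lt _ _ _ (by norm_num)))

theorem pvBNeg_lt (m : Nat) : pvBNeg m < 2^32 := by
  unfold pvBNeg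
  exact pv_or_lt (pv_or_lt (pv_or_lt (pv_or_lt pv_zero_lt
    (pv_or_lt (pv_or_lt (pv_or_lt (pv_shl_lt _ _ _ (by norm_num)) (pv_shl_lt _ _ _ (by norm_num))) (pv_shl_lt _ _ _ (by norm_num))) (pv_shl_lt _ _ _ (by norm_num))))
    (pv_or_lt (pv_or_lt (pv_or_lt (pv_shl_lt _ _ _ (by norm_num)) (pv_shl_lt _ _ _ (by norm_num))) (pv_shl_lt _ _ _ (by norm_num))) (pv_shl_lt _ _ _ (by norm_num))))
    (pv_or_lt (pv_or_lt (pv_or_lt (pv_shl_lt _ _ _ (by norm_num)) (pv_shl_lt _ _ _ (by norm_num))) (pv_shl_lt _ _ _ (by norm_num))) (pv_shl_lt _ _ _ (by norm_num))))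
    (pv_or_lt (pv_or_lt (pv_or_lt (pv_shl_lt _ _ _ (by norm_num)) (pv_shl_lt _ _ _ (by norm_num))) (pv_shl_lt _ _ _ (by norm_num))) (pv_shl_lt _ _ _ (by norm_num)))

set_option maxHeartbeats 4000000 in
theorem pvNat_eq (n : Nat) : pvANat n = pvBNat n := by
  apply Nat.eq_of_testBit_eq
  intro i
  rcases Nat.lt_or_ge i 32 with h | h
  · unfold pvANat pvBNat
    interval_cases i <;>
      · simp only [Nat.testBit_or, Nat.testBit_and, Nat.testBit_shiftLeft, Nat.testBit_shiftRight]
        simp [Nat.testBit]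
        try tauto
  · have h32 : (2:Nat) ^ 32 ≤ 2 ^ i := Nat.pow_le_pow_right (by norm_num) h
    rw [Nat.testBit_lt_two_pow (lt_of_lt_of_le (pvANat_lt n) h32),
        Nat.testBit_lt_two_pow (lt_of_lt_of_le (pvBNat_lt n) h32)]

set_option maxHeartbeats 4000000 in
theorem pvNeg_eq (m : Nat) : pvANeg m = pvBNeg m := by
  apply Nat.eq_of_testBit_eq
  intro i
  rcases Nat.lt_or_ge i 32 with h | h
  · unfold pvANeg pvBNeg
    interval_cases i <;>
      · simp only [Nat.testBit_or, Nat.testBit_and, Nat.testBit_xor, Nat.testBit_shiftLeft,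
          Nat.testBit_shiftRight]
        simp [Nat.testBit]
        try tauto
  · have h32 : (2:Nat) ^ 32 ≤ 2 ^ i := Nat.pow_le_pow_right (by norm_num) h
    rw [Nat.testBit_lt_two_pow (lt_of_lt_of_le (pvANeg_lt m) h32),
        Nat.testBit_lt_two_pow (lt_of_lt_of_le (pvBNeg_lt m) h32)]

theorem pvW_eq (w : Int) : pvWA w = pvWB w := by
  cases w with
  | ofNat n =>
    rw [show Int.ofNat n = (n:Int) from rfl, pvWA_natCast, pvWB_natCast, pvNat_eq]
  | negSucc m =>
    rw [pvWA_negSucc, pvWB_negSucc, pvNeg_eq]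

-- ===== VERDICT (by name: the statement is the Claim_ definition above) =====
theorem shiftcolumns2_inv_spec : Claim_equal_shiftcolumns2_inv := by
  intro state hdom hpre
  unfold Spec_shiftcolumns2_inv
  unfold Pre_shiftcolumns2_inv at hpre
  rcases state with _ | ⟨a, _ | ⟨b, _ | ⟨c, _ | ⟨d, rest⟩⟩⟩⟩ <;> simp at hpre
  rw [pvA_eval, pvB_eval, pvW_eq a, pvW_eq b, pvW_eq c, pvW_eq d]
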